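-- pv_equiv track=rewrite | github.com/tzurshubi/BiHS | src/search_coil_subpath_flip.py | is_valid_coil
-- ===== SOURCE A (Python) =====
-- from typing import List, Optional, Tuple, Dict
--
-- def hamming_dist_is_1(a: int, b: int) -> bool:
--     x = a ^ b
--     return x != 0 and (x & (x - 1)) == 0
--
-- def in_range_vertex(v: int, dim: int) -> bool:
--     return 0 <= v < (1 << dim)
--
-- def is_valid_coil(cycle: List[int], dim: int) -> bool:
--     n = len(cycle)
--     if n < 4:
--         return False
--
--     if len(set(cycle)) != n:
--         return False
--
--     for v in cycle:
--         if not in_range_vertex(v, dim):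
--             return False
--
--     for i in range(n):
--         if not hamming_dist_is_1(cycle[i], cycle[(i + 1) % n]):
--             return False
--
--     for i in range(n):
--         for j in range(i + 1, n):
--             if hamming_dist_is_1(cycle[i], cycle[j]):
--                 if j != i + 1 and not (i == 0 and j == n - 1):
--                     return False
--
--     return True
-- ===== SOURCE B (Python) =====
-- def is_valid_coil(cycle, dim):
--     n = len(cycle)
--     if n < 4:
--         return False
--     pos = {}
--     for i, v in enumerate(cycle):
--         if v in pos:
--             return False
--         pos[v] = i
--     for v in cycle:
--         if not (0 <= v < (1 << dim)):
--             return False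
--     nbits = min(dim, max(v.bit_length() for v in cycle))
--     for i in range(n):
--         x = cycle[i] ^ cycle[(i + 1) % n]
--         if x == 0 or x & (x - 1):
--             return False
--     for i, v in enumerate(cycle):
--         for d in range(nbits):
--             j = pos.get(v ^ (1 << d))
--             if j is not None and (j - i) % n not in (1, n - 1):
--                 return False
--     return True
-- ===== Notes on version B (the rewrite author's own statement) =====
-- stated objective: faster
-- what changed: The O(n^2) all-pairs chord scan is replaced by a hash index of vertex positions: for each vertex B enumerates its bit-flip neighbours (only bits that can land inside the vertex set) and checks the looked-up position is cyclically adjacent, and duplicates are detected while building that index.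
import Mathlib
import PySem

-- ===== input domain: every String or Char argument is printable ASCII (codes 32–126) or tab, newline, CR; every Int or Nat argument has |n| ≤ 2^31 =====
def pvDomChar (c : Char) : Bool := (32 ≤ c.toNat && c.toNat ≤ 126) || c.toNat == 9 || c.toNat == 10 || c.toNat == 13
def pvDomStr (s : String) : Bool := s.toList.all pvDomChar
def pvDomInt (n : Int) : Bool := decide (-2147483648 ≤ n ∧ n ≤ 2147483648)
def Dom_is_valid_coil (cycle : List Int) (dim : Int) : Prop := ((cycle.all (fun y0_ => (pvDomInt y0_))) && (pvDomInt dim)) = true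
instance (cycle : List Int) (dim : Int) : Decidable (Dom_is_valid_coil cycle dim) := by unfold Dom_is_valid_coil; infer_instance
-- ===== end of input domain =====

-- B replaces A's O(n^2) all-pairs chord scan by a position dictionary plus per-vertex bit-flip
-- neighbour lookups (checking cyclic adjacency of each looked-up position); equivalence of the
-- RETURN value is proved on Pre_ (outside Pre_ both Pythons raise ValueError on '1 << dim').

-- ===== PORT A =====
def hamming_dist_is_1 (a b : Int) : Bool :=
  let x := PySem.Int.bxor a b
  (x != 0) && (PySem.Int.band x (x - 1) == 0)

def in_range_vertex (v : Int) (dim : Int) : Bool :=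
  decide (0 ≤ v) && decide (v < (1 : Int) <<< dim.toNat)

def is_valid_coil (cycle : List Int) (dim : Int) : Bool :=
  let n : Int := cycle.length
  if n < 4 then false
  else if ((PySem.Set.ofList cycle).length : Int) ≠ n then false
  else if ¬ (cycle.all fun v => in_range_vertex v dim) then false
  else if ¬ ((PySem.List.pyRange 0 n 1).all fun i =>
      hamming_dist_is_1 (PySem.List.pyGetD cycle i 0)
        (PySem.List.pyGetD cycle (PySem.Int.mod (i + 1) n) 0)) then false
  else if ¬ ((PySem.List.pyRange 0 n 1).all fun i =>
      (PySem.List.pyRange (i + 1) n 1).all fun j =>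
        !(hamming_dist_is_1 (PySem.List.pyGetD cycle i 0) (PySem.List.pyGetD cycle j 0)
          && (decide (j ≠ i + 1) && !(decide (i = 0) && decide (j = n - 1))))) then false
  else true

-- ===== PORT B =====
-- the dict-building loop with its duplicate early-return
def buildPos : List Int → Int → PySem.Dict Int Int → Option (PySem.Dict Int Int)
  | [], _, pos => some pos
  | v :: rest, i, pos =>
      if pos.contains v then none else buildPos rest (i + 1) (pos.insert v i)

def is_valid_coil_alt (cycle : List Int) (dim : Int) : Bool :=
  let n : Int := cycle.length
  if n < 4 then false
  else
    match buildPos cycle 0 PySem.Dict.empty with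
    | none => false
    | some pos =>
      if ¬ (cycle.all fun v => decide (0 ≤ v) && decide (v < (1 : Int) <<< dim.toNat)) then false
      else
        -- max over a nonempty list (n ≥ 4 here), so the .getD 0 default is never used
        let nbits : Int :=
          min dim ((PySem.List.max? (cycle.map fun v => (PySem.Int.bitLength v : Int)) (fun y => y)).getD 0)
        if ¬ ((PySem.List.pyRange 0 n 1).all fun i =>
            let x := PySem.Int.bxor (PySem.List.pyGetD cycle i 0)
              (PySem.List.pyGetD cycle (PySem.Int.mod (i + 1) n) 0)
            (x != 0) && (PySem.Int.band x (x - 1) == 0)) then false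
        else if ¬ ((PySem.List.enumerate cycle 0).all fun iv =>
            (PySem.List.pyRange 0 nbits 1).all fun d =>
              match pos.get? (PySem.Int.bxor iv.2 ((1 : Int) <<< d.toNat)) with
              | none => true
              | some j =>
                  (PySem.Int.mod (j - iv.1) n == 1) || (PySem.Int.mod (j - iv.1) n == n - 1)) then false
        else true

-- ===== PRECONDITION & SPEC =====
-- Pre_ excludes exactly the inputs where A raises ValueError ('1 << dim' with dim < 0, reached
-- when the length/duplicate checks pass and the first vertex is nonnegative); B raises there too.
def Pre_is_valid_coil (cycle : List Int) (dim : Int) : Prop :=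
  0 ≤ dim ∨ (cycle.length : Int) < 4 ∨ ¬ cycle.Nodup ∨ cycle.headD 1 < 0
instance (cycle : List Int) (dim : Int) : Decidable (Pre_is_valid_coil cycle dim) := by
  unfold Pre_is_valid_coil; infer_instance

def pvWitness_is_valid_coil : List Int × Int := ([0, 1, 3, 2], 2)

def Spec_is_valid_coil (cycle : List Int) (dim : Int) (out : Bool) : Prop := out = is_valid_coil_alt cycle dim
instance (cycle : List Int) (dim : Int) (out : Bool) : Decidable (Spec_is_valid_coil cycle dim out) := by unfold Spec_is_valid_coil; infer_instance

-- ===== CLAIM (what is proved, stated in full; the proofs are below) =====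
def Claim_equal_is_valid_coil : Prop := ∀ (cycle : List Int) (dim : Int), Dom_is_valid_coil cycle dim → Pre_is_valid_coil cycle dim → Spec_is_valid_coil cycle dim (is_valid_coil cycle dim)

-- ===== LEMMAS AND PROOFS =====

theorem one_shiftLeft_int (k : Nat) : (1 : Int) <<< k = 2^k := by
  rw [Int.shiftLeft_eq]; ring

theorem pow2_of_and_pred (x : Nat) (hx : 0 < x) (h : x &&& (x-1) = 0) : ∃ d, x = 2^d := by
  induction x using Nat.strong_induction_on with
  | _ x ih =>
    have hdiv : (x &&& (x-1)) / 2 = x/2 &&& ((x-1)/2) := Nat.and_div_two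
    rw [h] at hdiv
    rcases Nat.even_or_odd x with ⟨m, hm⟩ | ⟨m, hm⟩
    · have hm0 : 0 < m := by omega
      have e1 : x/2 = m := by omega
      have e2 : (x-1)/2 = m-1 := by omega
      rw [e1, e2] at hdiv
      obtain ⟨d, hd⟩ := ih m (by omega) hm0 (by omega)
      exact ⟨d+1, by subst hd; rw [hm]; ring⟩
    · have e1 : x/2 = m := by omega
      have e2 : (x-1)/2 = m := by omega
      rw [e1, e2, Nat.and_self] at hdiv
      exact ⟨0, by omega⟩

theorem and_pred_pow2 (d : Nat) : (2^d) &&& (2^d - 1) = 0 := by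
  apply Nat.eq_of_testBit_eq; intro i
  simp

theorem ham_iff (p q : Nat) :
    hamming_dist_is_1 (p : Int) (q : Int) = true ↔ ∃ d : Nat, p ^^^ q = 2^d := by
  unfold hamming_dist_is_1
  rw [PySem.Int.bxor_natCast]
  simp only [Bool.and_eq_true, bne_iff_ne, beq_iff_eq]
  constructor
  · rintro ⟨hne, hband⟩
    have hx0 : 0 < p ^^^ q := by
      rcases Nat.eq_zero_or_pos (p ^^^ q) with h0 | h0
      · exact absurd (by exact_mod_cast congrArg (Nat.cast : Nat → Int) h0) (by simpa using hne)
      · exact h0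
    have hcast : ((p ^^^ q : Nat) : Int) - 1 = (((p ^^^ q) - 1 : Nat) : Int) :=
      (Int.natCast_pred_of_pos hx0).symm
    rw [hcast, PySem.Int.band_natCast] at hband
    have : (p ^^^ q) &&& ((p ^^^ q) - 1) = 0 := by exact_mod_cast hband
    exact pow2_of_and_pred _ hx0 this
  · rintro ⟨d, hd⟩
    rw [hd]
    refine ⟨by positivity, ?_⟩
    have hcast : ((2^d : Nat) : Int) - 1 = (((2^d) - 1 : Nat) : Int) :=
      (Int.natCast_pred_of_pos (Nat.two_pow_pos d)).symm
    rw [hcast, PySem.Int.band_natCast, and_pred_pow2]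
    rfl

theorem mod_adj (n i j : Int) (hn : 4 ≤ n) (hi : 0 ≤ i) (hin : i < n) (hj : 0 ≤ j) (hjn : j < n)
    (hij : i ≠ j) :
    (PySem.Int.mod (j - i) n = 1 ∨ PySem.Int.mod (j - i) n = n - 1) ↔
      (j = i + 1 ∨ i = j + 1 ∨ (i = 0 ∧ j = n - 1) ∨ (j = 0 ∧ i = n - 1)) := by
  rw [PySem.Int.mod_eq_emod_of_pos (by omega : (0:Int) < n)]
  rcases lt_or_gt_of_ne hij with hlt | hgt
  · rw [Int.emod_eq_of_lt (by omega) (by omega)]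
    omega
  · have h1 : (j - i + n) % n = (j - i) % n := (Int.emod_eq_add_self_emod).symm
    rw [← h1, Int.emod_eq_of_lt (by omega) (by omega)]
    omega

theorem ofList_length_eq_iff (xs : List Int) :
    (PySem.Set.ofList xs).length = xs.length ↔ xs.Nodup := by
  induction xs with
  | nil => simp [PySem.Set.ofList_nil]
  | cons x xs ih =>
    rw [PySem.Set.ofList_cons]
    constructor
    · intro h
      simp only [List.length_cons] at h
      have hle : (PySem.Set.discard (PySem.Set.ofList xs) x).length ≤ (PySem.Set.ofList xs).length := by
        simp [PySem.Set.discard]; exact List.length_filter_le _ _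
      have hle2 := PySem.Set.length_ofList_le (xs := xs)
      have hnd := ih.mp (by omega)
      have hx : x ∉ xs := by
        intro hmem
        have hmem' : x ∈ PySem.Set.ofList xs := (PySem.Set.mem_ofList xs x).mpr hmem
        have : (PySem.Set.discard (PySem.Set.ofList xs) x).length < (PySem.Set.ofList xs).length := by
          simp only [PySem.Set.discard]
          apply List.length_filter_lt_length_iff_exists.mpr
          exact ⟨x, hmem', by simp⟩
        omega
      exact List.nodup_cons.mpr ⟨hx, hnd⟩
    · intro h
      rcases List.nodup_cons.mp h with ⟨hx, hnd⟩
      rw [PySem.Set.ofList_eq_self_of_nodup xs hnd]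
      have : PySem.Set.discard xs x = xs := by
        simp only [PySem.Set.discard]
        apply List.filter_eq_self.mpr
        intro a ha; simp; rintro rfl; exact hx ha
      rw [this]

theorem buildPos_fresh (l : List Int) (i : Int) (pos p : PySem.Dict Int Int)
    (h : buildPos l i pos = some p) : ∀ v ∈ l, pos.contains v = false := by
  induction l generalizing i pos with
  | nil => intro v hv; cases hv
  | cons v0 rest ih =>
    intro v hv
    rw [buildPos] at h
    by_cases hc : pos.contains v0
    · simp [hc] at h
    · simp only [hc, if_neg, Bool.false_eq_true, not_false_eq_true] at h
      rcases List.mem_cons.mp hv with rfl | hv'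
      · simpa using hc
      · have := ih (i+1) (pos.insert v0 i) h v hv'
        rw [PySem.Dict.contains_insert] at this
        simp only [Bool.or_eq_false_iff] at this
        exact this.2

theorem buildPos_mem_contains_none (l : List Int) (i : Int) (pos : PySem.Dict Int Int)
    (v : Int) (hv : v ∈ l) (hc : pos.contains v = true) : buildPos l i pos = none := by
  induction l generalizing i pos with
  | nil => cases hv
  | cons u rest ih =>
    rw [buildPos]
    by_cases hu : pos.contains u
    · simp [hu]
    · simp only [hu, Bool.false_eq_true, not_false_eq_true, if_neg]
      rcases List.mem_cons.mp hv with rfl | hv'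
      · exact absurd hc (by simpa using hu)
      · exact ih (i+1) _ hv' (by rw [PySem.Dict.contains_insert, hc]; simp)

theorem buildPos_none_of_not_nodup (l : List Int) (i : Int) (pos : PySem.Dict Int Int)
    (h : ¬ l.Nodup) : buildPos l i pos = none := by
  induction l generalizing i pos with
  | nil => exact absurd List.nodup_nil h
  | cons v rest ih =>
    rw [buildPos]
    by_cases hc : pos.contains v
    · simp [hc]
    · simp only [hc, Bool.false_eq_true, not_false_eq_true, if_neg]
      rw [List.nodup_cons] at h
      push_neg at h
      by_cases hm : v ∈ rest
      · exact buildPos_mem_contains_none rest (i+1) _ v hm (by simp [PySem.Dict.contains_insert])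
      · exact ih (i+1) _ (h hm)

theorem buildPos_some_of_nodup (l : List Int) (i : Int) (pos : PySem.Dict Int Int)
    (hnd : l.Nodup) (hfresh : ∀ v ∈ l, pos.contains v = false) :
    ∃ p, buildPos l i pos = some p := by
  induction l generalizing i pos with
  | nil => exact ⟨pos, rfl⟩
  | cons v rest ih =>
    rw [buildPos]
    have hc : pos.contains v = false := hfresh v List.mem_cons_self
    simp only [hc, Bool.false_eq_true, not_false_eq_true, if_neg]
    rcases List.nodup_cons.mp hnd with ⟨hx, hnd'⟩
    refine ih (i+1) _ hnd' ?_
    intro u hu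
    rw [PySem.Dict.contains_insert]
    have : u ≠ v := fun h => hx (h ▸ hu)
    simp [this, hfresh u (List.mem_cons_of_mem _ hu)]

theorem buildPos_get?_iff (l : List Int) (i : Int) (pos p : PySem.Dict Int Int)
    (h : buildPos l i pos = some p) (w j : Int) :
    p.get? w = some j ↔
      ((∃ k : Nat, l[k]? = some w ∧ j = i + k) ∨ (w ∉ l ∧ pos.get? w = some j)) := by
  induction l generalizing i pos with
  | nil =>
    rw [buildPos] at h
    cases h
    simp
  | cons v rest ih =>
    rw [buildPos] at h
    by_cases hc : pos.contains v
    · simp [hc] at h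
    · simp only [hc, Bool.false_eq_true, not_false_eq_true, if_neg] at h
      have hfresh : v ∉ rest := by
        intro hm
        have := buildPos_fresh rest (i+1) _ p h v hm
        rw [PySem.Dict.contains_insert] at this
        simp at this
      rw [ih (i+1) _ h]
      by_cases hw : w = v
      · subst hw
        constructor
        · rintro (⟨k, hk, rfl⟩ | ⟨hnm, hg⟩)
          · exact absurd (List.mem_of_getElem? hk) hfresh
          · rw [PySem.Dict.get?_insert_self] at hg
            cases hg
            exact Or.inl ⟨0, by simp, by simp⟩
        · rintro (⟨k, hk, rfl⟩ | ⟨hnm, hg⟩)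
          · match k, hk with
            | 0, hk =>
              refine Or.inr ⟨hfresh, ?_⟩
              rw [PySem.Dict.get?_insert_self]
              simp
            | (k+1 : Nat), hk =>
              simp only [List.getElem?_cons_succ] at hk
              exact absurd (List.mem_of_getElem? hk) hfresh
          · exact absurd (List.mem_cons_self) hnm
      · have hne : (pos.insert v i).get? w = pos.get? w := PySem.Dict.get?_insert_of_ne _ _ hw
        constructor
        · rintro (⟨k, hk, rfl⟩ | ⟨hnm, hg⟩)
          · exact Or.inl ⟨k+1, by simpa using hk, by push_cast; ring⟩
          · rw [hne] at hg
            exact Or.inr ⟨by simp [hw, hnm], hg⟩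
        · rintro (⟨k, hk, rfl⟩ | ⟨hnm, hg⟩)
          · match k, hk with
            | 0, hk => simp only [List.getElem?_cons_zero] at hk; cases hk; exact absurd rfl hw
            | (k+1 : Nat), hk =>
              simp only [List.getElem?_cons_succ] at hk
              exact Or.inl ⟨k, hk, by push_cast; ring⟩
          · rw [List.mem_cons] at hnm; push_neg at hnm
            exact Or.inr ⟨hnm.2, by rw [hne]; exact hg⟩

theorem chord_eq (cycle : List Int) (dim : Int) (p : PySem.Dict Int Int)
    (hb : buildPos cycle 0 PySem.Dict.empty = some p)
    (h4 : 4 ≤ (cycle.length : Int))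
    (hnd : cycle.Nodup)
    (hr : ∀ v ∈ cycle, 0 ≤ v ∧ v < (1:Int) <<< dim.toNat) :
    ((PySem.List.pyRange 0 (cycle.length : Int) 1).all fun i =>
        (PySem.List.pyRange (i + 1) (cycle.length : Int) 1).all fun j =>
          !(hamming_dist_is_1 (PySem.List.pyGetD cycle i 0) (PySem.List.pyGetD cycle j 0)
            && (decide (j ≠ i + 1) && !(decide (i = 0) && decide (j = (cycle.length : Int) - 1)))))
    = ((PySem.List.enumerate cycle 0).all fun iv =>
        (PySem.List.pyRange 0
            (min dim ((PySem.List.max? (cycle.map fun v => (PySem.Int.bitLength v : Int)) (fun y => y)).getD 0)) 1).all fun d =>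
          match p.get? (PySem.Int.bxor iv.2 ((1 : Int) <<< d.toNat)) with
          | none => true
          | some j =>
              (PySem.Int.mod (j - iv.1) (cycle.length : Int) == 1)
                || (PySem.Int.mod (j - iv.1) (cycle.length : Int) == (cycle.length : Int) - 1)) := by
  have hlen4 : 4 ≤ cycle.length := by exact_mod_cast h4
  have hr' : ∀ {k : Nat} (hk : k < cycle.length),
      0 ≤ cycle[k] ∧ (cycle[k]).toNat < 2^dim.toNat := by
    intro k hk
    obtain ⟨h1, h2⟩ := hr _ (List.getElem_mem hk)
    rw [one_shiftLeft_int] at h2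
    refine ⟨h1, ?_⟩
    have : ((2:Int)^dim.toNat) = ((2^dim.toNat : Nat) : Int) := by push_cast; ring
    omega
  have hdim0 : 0 ≤ dim := by
    by_contra hneg
    push_neg at hneg
    have hD : dim.toNat = 0 := Int.toNat_of_nonpos (le_of_lt hneg)
    have e0 : cycle[0]'(by omega) = 0 := by
      obtain ⟨h1, h2⟩ := hr' (k := 0) (by omega); rw [hD] at h2; omega
    have e1 : cycle[1]'(by omega) = 0 := by
      obtain ⟨h1, h2⟩ := hr' (k := 1) (by omega); rw [hD] at h2; omega
    have : (0:Nat) = 1 := hnd.getElem_inj_iff.mp (e0.trans e1.symm)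
    omega
  obtain ⟨m0, hm0⟩ : ∃ m0,
      PySem.List.max? (cycle.map fun v => (PySem.Int.bitLength v : Int)) (fun y => y) = some m0 := by
    cases hq : PySem.List.max? (cycle.map fun v => (PySem.Int.bitLength v : Int)) (fun y => y) with
    | none =>
      rw [PySem.List.max?_eq_none_iff] at hq
      simp only [List.map_eq_nil_iff] at hq
      subst hq; simp at hlen4
    | some m => exact ⟨m, rfl⟩
  have hm0' : ∀ v ∈ cycle, (PySem.Int.bitLength v : Int) ≤ m0 := by
    intro v hv
    have := PySem.List.max?_isMax hm0 ((PySem.Int.bitLength v : Int)) (List.mem_map_of_mem hv)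
    simpa using this
  rw [hm0]
  simp only [Option.getD_some]
  set n : Int := (cycle.length : Int) with hn
  set nb : Int := min dim m0 with hnb
  -- d-bound
  have hdlt : ∀ {a b : Nat} (ha : a < cycle.length) (hc : b < cycle.length), ∀ d : Nat,
      (cycle[a]'ha).toNat ^^^ (cycle[b]'hc).toNat = 2^d → (d : Int) < nb := by
    intro a b ha hc d heq
    have hpa := hr' ha
    have hpb := hr' hc
    rw [lt_min_iff]
    constructor
    · have hxlt : (cycle[a]).toNat ^^^ (cycle[b]).toNat < 2^dim.toNat :=
        Nat.xor_lt_two_pow hpa.2 hpb.2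
      rw [heq] at hxlt
      have hdD : d < dim.toNat := (Nat.pow_lt_pow_iff_right (by omega)).mp hxlt
      have : ((dim.toNat : Nat) : Int) = dim := Int.toNat_of_nonneg hdim0
      omega
    · have hBa := PySem.Int.lt_two_pow_bitLength (cycle[a])
      have hBb := PySem.Int.lt_two_pow_bitLength (cycle[b])
      set Ba := PySem.Int.bitLength (cycle[a]) with hBadef
      set Bb := PySem.Int.bitLength (cycle[b]) with hBbdef
      have hna : (cycle[a]).natAbs = (cycle[a]).toNat := by have := hpa.1; omega
      have hnb' : (cycle[b]).natAbs = (cycle[b]).toNat := by have := hpb.1; omega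
      rw [hna] at hBa; rw [hnb'] at hBb
      have hK : (cycle[a]).toNat ^^^ (cycle[b]).toNat < 2^(max Ba Bb) :=
        Nat.xor_lt_two_pow
          (lt_of_lt_of_le hBa (Nat.pow_le_pow_right (by omega) (le_max_left _ _)))
          (lt_of_lt_of_le hBb (Nat.pow_le_pow_right (by omega) (le_max_right _ _)))
      rw [heq] at hK
      have hdK : d < max Ba Bb := (Nat.pow_lt_pow_iff_right (by omega)).mp hK
      have h1 := hm0' _ (List.getElem_mem ha)
      have h2 := hm0' _ (List.getElem_mem hc)
      rw [← hBadef] at h1; rw [← hBbdef] at h2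
      omega
  -- get? characterization
  have hget : ∀ (w j : Int), p.get? w = some j ↔
      ∃ k : Nat, k < cycle.length ∧ cycle[k]? = some w ∧ j = (k : Int) := by
    intro w j
    rw [buildPos_get?_iff cycle 0 _ p hb w j]
    simp only [PySem.Dict.get?_empty, and_false, or_false, zero_add, reduceCtorEq]
    constructor
    · rintro ⟨k, hk, rfl⟩
      exact ⟨k, (List.getElem?_eq_some_iff.mp hk).1, hk, rfl⟩
    · rintro ⟨k, _, hk, rfl⟩
      exact ⟨k, hk, rfl⟩
  -- Prop forms
  have hL : ((PySem.List.pyRange 0 n 1).all fun i =>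
        (PySem.List.pyRange (i + 1) n 1).all fun j =>
          !(hamming_dist_is_1 (PySem.List.pyGetD cycle i 0) (PySem.List.pyGetD cycle j 0)
            && (decide (j ≠ i + 1) && !(decide (i = 0) && decide (j = n - 1))))) = true ↔
      (∀ (a b : Nat) (hab : a < b) (hbl : b < cycle.length),
        hamming_dist_is_1 (cycle[a]'(by omega)) (cycle[b]'hbl) = true →
        ((b:Int) = (a:Int) + 1 ∨ (a = 0 ∧ (b:Int) = n - 1))) := by
    constructor
    · intro H a b hab hbl hham
      have h1 := List.all_eq_true.mp H (a : Int)
        (by rw [PySem.List.mem_pyRange_one]; omega)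
      have h2 := List.all_eq_true.mp h1 (b : Int)
        (by rw [PySem.List.mem_pyRange_one]; omega)
      rw [PySem.List.pyGetD_natCast, PySem.List.pyGetD_natCast,
        List.getD_eq_getElem cycle 0 (show a < cycle.length by omega),
        List.getD_eq_getElem cycle 0 hbl, hham] at h2
      simp at h2
      omega
    · intro H
      rw [List.all_eq_true]
      intro i hi
      rw [PySem.List.mem_pyRange_one] at hi
      rw [List.all_eq_true]
      intro j hj
      rw [PySem.List.mem_pyRange_one] at hj
      obtain ⟨a, rfl⟩ : ∃ a : Nat, i = (a:Int) := ⟨i.toNat, (Int.toNat_of_nonneg hi.1).symm⟩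
      obtain ⟨b, rfl⟩ : ∃ b : Nat, j = (b:Int) := ⟨j.toNat, (Int.toNat_of_nonneg (by omega)).symm⟩
      have hab : a < b := by omega
      have hbl : b < cycle.length := by omega
      rw [PySem.List.pyGetD_natCast, PySem.List.pyGetD_natCast,
        List.getD_eq_getElem cycle 0 (show a < cycle.length by omega),
        List.getD_eq_getElem cycle 0 hbl]
      cases hham : hamming_dist_is_1 (cycle[a]'(by omega)) (cycle[b]'hbl) with
      | false => simp [hham]
      | true =>
        have hcon := H a b hab hbl hham
        rcases hcon with h | h
        · simp [hham, h]
        · have ha0 : ((a:Nat):Int) = 0 := by omega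
          simp [hham, ha0, h.2]
  have hR : ((PySem.List.enumerate cycle 0).all fun iv =>
        (PySem.List.pyRange 0 nb 1).all fun d =>
          match p.get? (PySem.Int.bxor iv.2 ((1 : Int) <<< d.toNat)) with
          | none => true
          | some j =>
              (PySem.Int.mod (j - iv.1) n == 1)
                || (PySem.Int.mod (j - iv.1) n == n - 1)) = true ↔
      (∀ (a b : Nat) (hab : a < b) (hbl : b < cycle.length),
        hamming_dist_is_1 (cycle[a]'(by omega)) (cycle[b]'hbl) = true →
        ((b:Int) = (a:Int) + 1 ∨ (a = 0 ∧ (b:Int) = n - 1))) := by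
    rw [PySem.List.enumerate_eq_map_pyRange (d := 0), List.all_map]
    constructor
    · -- RHS loop → no-chord property
      intro H a b hab hbl hham
      have hal : a < cycle.length := by omega
      have hann := (hr' hal).1
      have hbnn := (hr' hbl).1
      have hcda : ((cycle[a]'hal).toNat : Int) = cycle[a]'hal := Int.toNat_of_nonneg hann
      have hcdb : ((cycle[b]'hbl).toNat : Int) = cycle[b]'hbl := Int.toNat_of_nonneg hbnn
      obtain ⟨d, hd⟩ : ∃ d : Nat, (cycle[a]'hal).toNat ^^^ (cycle[b]'hbl).toNat = 2^d := by
        rw [← ham_iff]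
        rw [hcda, hcdb]
        exact hham
      have hdnb : (d : Int) < nb := hdlt hal hbl d hd
      have h1 := List.all_eq_true.mp H (a : Int)
        (by rw [PySem.List.mem_pyRange_one]; simp only [PySem.List.len_eq]; omega)
      simp only [Function.comp] at h1
      have h2 := List.all_eq_true.mp h1 (d : Int)
        (by rw [PySem.List.mem_pyRange_one]; omega)
      rw [PySem.List.pyGetD_natCast, List.getD_eq_getElem cycle 0 hal] at h2
      have htn : ((d : Int)).toNat = d := Int.toNat_natCast d
      rw [htn, one_shiftLeft_int] at h2
      have hw : PySem.Int.bxor (cycle[a]'hal) ((2:Int)^d) = cycle[b]'hbl := by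
        rw [← hcda, ← hcdb]
        have : ((2:Int)^d) = ((2^d : Nat) : Int) := by push_cast; ring
        rw [this, PySem.Int.bxor_natCast]
        congr 1
        rw [← hd, ← Nat.xor_assoc, Nat.xor_self, Nat.zero_xor]
      rw [hw] at h2
      have hq : p.get? (cycle[b]'hbl) = some (b : Int) := by
        rw [hget]
        exact ⟨b, hbl, by rw [List.getElem?_eq_some_iff]; exact ⟨hbl, rfl⟩, rfl⟩
      rw [hq] at h2
      simp only [Bool.or_eq_true, beq_iff_eq] at h2
      have hmadj := (mod_adj n (a:Int) (b:Int) h4 (by omega) (by omega) (by omega) (by omega)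
        (by omega)).mp h2
      omega
    · -- no-chord property → RHS loop
      intro H
      rw [List.all_eq_true]
      intro i hi
      rw [PySem.List.mem_pyRange_one] at hi
      simp only [PySem.List.len_eq] at hi
      simp only [Function.comp]
      rw [List.all_eq_true]
      intro d hd
      rw [PySem.List.mem_pyRange_one] at hd
      obtain ⟨a, rfl⟩ : ∃ a : Nat, i = (a:Int) := ⟨i.toNat, (Int.toNat_of_nonneg hi.1).symm⟩
      obtain ⟨dt, rfl⟩ : ∃ dt : Nat, d = (dt:Int) := ⟨d.toNat, (Int.toNat_of_nonneg hd.1).symm⟩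
      have hal : a < cycle.length := by omega
      rw [PySem.List.pyGetD_natCast, List.getD_eq_getElem cycle 0 hal,
        Int.toNat_natCast, one_shiftLeft_int]
      cases hq : p.get? (PySem.Int.bxor (cycle[a]'hal) ((2:Int)^dt)) with
      | none => simp
      | some j =>
        simp only
        obtain ⟨k, hkl, hkw, rfl⟩ := (hget _ _).mp hq
        have hkv : cycle[k]'hkl = PySem.Int.bxor (cycle[a]'hal) ((2:Int)^dt) :=
          (List.getElem?_eq_some_iff.mp hkw).2
        have hann := (hr' hal).1
        have hknn := (hr' hkl).1
        have hcda : ((cycle[a]'hal).toNat : Int) = cycle[a]'hal := Int.toNat_of_nonneg hann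
        have hcdk : ((cycle[k]'hkl).toNat : Int) = cycle[k]'hkl := Int.toNat_of_nonneg hknn
        have hkx : (cycle[k]'hkl).toNat = (cycle[a]'hal).toNat ^^^ 2^dt := by
          have h2c : ((2:Int)^dt) = ((2^dt : Nat) : Int) := by push_cast; ring
          rw [← hcda, h2c, PySem.Int.bxor_natCast] at hkv
          exact_mod_cast congrArg Int.toNat hkv
        have hxor : (cycle[a]'hal).toNat ^^^ (cycle[k]'hkl).toNat = 2^dt := by
          rw [hkx, ← Nat.xor_assoc, Nat.xor_self, Nat.zero_xor]
        have hka : k ≠ a := by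
          intro rfl'
          subst rfl'
          rw [Nat.xor_self] at hxor
          have := Nat.two_pow_pos dt
          omega
        have hham_ak : hamming_dist_is_1 (cycle[a]'hal) (cycle[k]'hkl) = true := by
          rw [← hcda, ← hcdk, ham_iff]
          exact ⟨dt, hxor⟩
        have hmod : PySem.Int.mod ((k:Int) - (a:Int)) n = 1 ∨
            PySem.Int.mod ((k:Int) - (a:Int)) n = n - 1 := by
          rw [mod_adj n (a:Int) (k:Int) h4 (by omega) (by omega) (by omega) (by omega) (by omega)]
          rcases Nat.lt_or_ge a k with hlt | hge
          · have hcon := H a k hlt hkl hham_ak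
            omega
          · have hlt2 : k < a := by omega
            have hham_ka : hamming_dist_is_1 (cycle[k]'hkl) (cycle[a]'hal) = true := by
              rw [← hcda, ← hcdk, ham_iff]
              exact ⟨dt, by rw [Nat.xor_comm]; exact hxor⟩
            have hcon := H k a hlt2 hal hham_ka
            omega
        simp only [Bool.or_eq_true, beq_iff_eq]
        exact hmod
  exact Bool.eq_iff_iff.mpr (hL.trans hR.symm)


-- ===== VERDICT (by name: the statement is the Claim_ definition above) =====
theorem is_valid_coil_spec : Claim_equal_is_valid_coil := by
  intro cycle dim hdom hpre
  unfold Spec_is_valid_coil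
  unfold is_valid_coil is_valid_coil_alt
  by_cases h4 : (cycle.length : Int) < 4
  · simp [h4]
  · simp only [h4, if_false, if_neg, not_false_eq_true]
    by_cases hnd : cycle.Nodup
    · have hA : ((PySem.Set.ofList cycle).length : Int) = (cycle.length : Int) := by
        exact_mod_cast congrArg (Nat.cast (R := Int)) ((ofList_length_eq_iff cycle).mpr hnd)
      obtain ⟨p, hp⟩ := buildPos_some_of_nodup cycle 0 PySem.Dict.empty hnd
        (fun v _ => PySem.Dict.contains_empty v)
      rw [hp]
      simp only [hA, ne_eq, not_true_eq_false, Bool.false_eq_true, if_false]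
      rw [show (cycle.all fun v => decide (0 ≤ v) && decide (v < (1:Int) <<< dim.toNat))
            = (cycle.all fun v => in_range_vertex v dim) from rfl]
      by_cases hR : (cycle.all fun v => in_range_vertex v dim) = true
      · simp only [hR, not_true_eq_false, Bool.false_eq_true, if_false]
        rw [show ((PySem.List.pyRange 0 (cycle.length : Int) 1).all fun i =>
              (PySem.Int.bxor (PySem.List.pyGetD cycle i 0)
                  (PySem.List.pyGetD cycle (PySem.Int.mod (i + 1) (cycle.length : Int)) 0) != 0)
                && (PySem.Int.band
                      (PySem.Int.bxor (PySem.List.pyGetD cycle i 0)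
                        (PySem.List.pyGetD cycle (PySem.Int.mod (i + 1) (cycle.length : Int)) 0))
                      (PySem.Int.bxor (PySem.List.pyGetD cycle i 0)
                          (PySem.List.pyGetD cycle (PySem.Int.mod (i + 1) (cycle.length : Int)) 0) - 1) == 0))
            = ((PySem.List.pyRange 0 (cycle.length : Int) 1).all fun i =>
                hamming_dist_is_1 (PySem.List.pyGetD cycle i 0)
                  (PySem.List.pyGetD cycle (PySem.Int.mod (i + 1) (cycle.length : Int)) 0)) from rfl]
        have hr' : ∀ v ∈ cycle, 0 ≤ v ∧ v < (1:Int) <<< dim.toNat := by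
          intro v hv
          have := List.all_eq_true.mp hR v hv
          simp only [in_range_vertex, Bool.and_eq_true, decide_eq_true_eq] at this
          exact this
        rw [chord_eq cycle dim p hp (by omega) hnd hr']
      · simp [hR]
    · have hA : ¬ ((PySem.Set.ofList cycle).length : Int) = (cycle.length : Int) := by
        intro h
        exact hnd ((ofList_length_eq_iff cycle).mp (by exact_mod_cast h))
      rw [buildPos_none_of_not_nodup cycle 0 PySem.Dict.empty hnd]
      simp [hA]
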